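-- pv_equiv track=rewrite | github.com/ahmed5145/chessmate-prod | chess_mate/core/analysis/pattern_analyzer.py | _generate_pattern_assessment
-- ===== SOURCE A (Python) =====
-- from typing import Any, Dict, List, Optional
--
-- def _generate_pattern_assessment(patterns: Dict[str, List[Dict[str, Any]]]) -> str:
--     """Generate overall assessment based on patterns found."""
--     total_patterns = sum(len(p) for p in patterns.values())
--     if total_patterns == 0:
--         return "No significant patterns identified"
--
--     tactical_count = len(patterns["tactical"])
--     positional_count = len(patterns["positional"])
--     endgame_count = len(patterns["endgame"])
--
--     if tactical_count > positional_count and tactical_count > endgame_count: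
--         return "Predominantly tactical play with multiple combinations"
--     elif positional_count > tactical_count and positional_count > endgame_count:
--         return "Strong positional play with strategic themes"
--     elif endgame_count > tactical_count and endgame_count > positional_count:
--         return "Technical endgame play with classic patterns"
--     else:
--         return "Balanced play with mixed tactical and positional elements"
-- ===== SOURCE B (Python) =====
-- def _generate_pattern_assessment(patterns):
--     """Generate overall assessment based on patterns found."""
--     total = sum(len(p) for p in patterns.values())
--     if total == 0:
--         return "No significant patterns identified"
--     ranked = sorted(
--         [(len(patterns["tactical"]), "Predominantly tactical play with multiple combinations"),
--          (len(patterns["positional"]), "Strong positional play with strategic themes"),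
--          (len(patterns["endgame"]), "Technical endgame play with classic patterns")],
--         key=lambda cm: cm[0],
--         reverse=True,
--     )
--     if ranked[0][0] > ranked[1][0]:
--         return ranked[0][1]
--     return "Balanced play with mixed tactical and positional elements"
-- ===== Notes on version B (the rewrite author's own statement) =====
-- stated objective: alternative
-- what changed: Replaces the pairwise if/elif strict-comparison cascade with sort-then-scan: build the three (count, message) pairs, sort them descending by count, and return the top message iff the top count strictly beats the runner-up, else the balanced message.
import Mathlib
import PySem

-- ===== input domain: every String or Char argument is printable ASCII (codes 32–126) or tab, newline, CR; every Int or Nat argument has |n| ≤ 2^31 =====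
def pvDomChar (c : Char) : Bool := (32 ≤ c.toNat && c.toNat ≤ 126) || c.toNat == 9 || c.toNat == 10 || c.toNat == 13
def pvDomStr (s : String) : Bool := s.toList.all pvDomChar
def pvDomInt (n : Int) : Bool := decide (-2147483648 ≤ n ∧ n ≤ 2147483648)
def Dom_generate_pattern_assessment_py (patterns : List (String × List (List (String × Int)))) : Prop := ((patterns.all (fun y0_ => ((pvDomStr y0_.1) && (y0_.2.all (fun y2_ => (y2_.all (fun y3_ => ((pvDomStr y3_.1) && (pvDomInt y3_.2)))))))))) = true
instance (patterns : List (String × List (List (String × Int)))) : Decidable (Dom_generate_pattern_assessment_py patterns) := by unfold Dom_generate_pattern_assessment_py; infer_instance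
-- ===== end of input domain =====

-- B replaces A's pairwise if/elif cascade with sort-then-scan over (count, message)
-- pairs (objective: alternative decomposition, same cost). Return value only.

-- ===== PORT A =====
-- literal transliteration of A's cascade; "KeyError" arm is unreachable under Pre_
def generate_pattern_assessment_py (patterns : List (String × List (List (String × Int)))) : String :=
  let total : Int := patterns.foldl (fun acc p => acc + (p.2.length : Int)) 0
  if total = 0 then "No significant patterns identified"
  else
    match (PySem.Dict.mk patterns).get? "tactical", (PySem.Dict.mk patterns).get? "positional",
          (PySem.Dict.mk patterns).get? "endgame" with
    | some t, some pos, some e =>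
      let tc : Int := t.length
      let pc : Int := pos.length
      let ec : Int := e.length
      if tc > pc ∧ tc > ec then "Predominantly tactical play with multiple combinations"
      else if pc > tc ∧ pc > ec then "Strong positional play with strategic themes"
      else if ec > tc ∧ ec > pc then "Technical endgame play with classic patterns"
      else "Balanced play with mixed tactical and positional elements"
    | _, _, _ => "KeyError"  -- Python raises KeyError here; excluded by Pre_

-- ===== PORT B =====
def generate_pattern_assessment_py_alt (patterns : List (String × List (List (String × Int)))) : String :=
  let total : Int := patterns.foldl (fun acc p => acc + (p.2.length : Int)) 0
  if total = 0 then "No significant patterns identified"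
  else
    match (PySem.Dict.mk patterns).get? "tactical" with
    | none => "KeyError"  -- Python raises KeyError here; excluded by Pre_
    | some t =>
    match (PySem.Dict.mk patterns).get? "positional" with
    | none => "KeyError"
    | some pos =>
    match (PySem.Dict.mk patterns).get? "endgame" with
    | none => "KeyError"
    | some e =>
      let ranked := PySem.List.sorted
        [((t.length : Int), "Predominantly tactical play with multiple combinations"),
         ((pos.length : Int), "Strong positional play with strategic themes"),
         ((e.length : Int), "Technical endgame play with classic patterns")]
        (fun cm => cm.1) true
      -- ranked[0] / ranked[1]: the list has exactly three elements, so both indices exist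
      match ranked with
      | c0 :: c1 :: _ => if c0.1 > c1.1 then c0.2 else "Balanced play with mixed tactical and positional elements"
      | _ => ""  -- unreachable: ranked has length 3

-- ===== PRECONDITION & SPEC =====
-- Pre_ excludes exactly the inputs where Python A raises KeyError: some pattern list is
-- nonempty (so the total-zero guard does not return) yet one of the three keys is absent.
def Pre_generate_pattern_assessment_py (patterns : List (String × List (List (String × Int)))) : Prop :=
  (∀ kv ∈ patterns, kv.2 = []) ∨
  ("tactical" ∈ patterns.map Prod.fst ∧ "positional" ∈ patterns.map Prod.fst ∧
   "endgame" ∈ patterns.map Prod.fst)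
instance (patterns : List (String × List (List (String × Int)))) : Decidable (Pre_generate_pattern_assessment_py patterns) := by unfold Pre_generate_pattern_assessment_py; infer_instance

def pvWitness_generate_pattern_assessment_py : (List (String × List (List (String × Int)))) :=
  [("tactical", [[("a", 1)]]), ("positional", []), ("endgame", [])]

def Spec_generate_pattern_assessment_py (patterns : List (String × List (List (String × Int)))) (out : String) : Prop := out = generate_pattern_assessment_py_alt patterns
instance (patterns : List (String × List (List (String × Int)))) (out : String) : Decidable (Spec_generate_pattern_assessment_py patterns out) := by unfold Spec_generate_pattern_assessment_py; infer_instance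

-- ===== CLAIM (what is proved, stated in full; the proofs are below) =====
def Claim_equal_generate_pattern_assessment_py : Prop := ∀ (patterns : List (String × List (List (String × Int)))), Dom_generate_pattern_assessment_py patterns → Pre_generate_pattern_assessment_py patterns → Spec_generate_pattern_assessment_py patterns (generate_pattern_assessment_py patterns)

-- ===== LEMMAS AND PROOFS =====

-- the core of the equivalence: on three counts, the strict cascade equals
-- sort-descending-then-compare-top-two
set_option maxRecDepth 8000 in
theorem core_eq (tc pc ec : Int) :
    (if tc > pc ∧ tc > ec then "Predominantly tactical play with multiple combinations"
     else if pc > tc ∧ pc > ec then "Strong positional play with strategic themes"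
     else if ec > tc ∧ ec > pc then "Technical endgame play with classic patterns"
     else "Balanced play with mixed tactical and positional elements")
    =
    (match PySem.List.sorted
        [(tc, "Predominantly tactical play with multiple combinations"),
         (pc, "Strong positional play with strategic themes"),
         (ec, "Technical endgame play with classic patterns")] (fun cm => cm.1) true with
     | c0 :: c1 :: _ => if c0.1 > c1.1 then c0.2 else "Balanced play with mixed tactical and positional elements"
     | _ => "") := by
  rw [PySem.List.sorted_rev_eq_foldl_insertBy]
  simp only [List.foldl, PySem.List.insertBy]
  split_ifs <;> simp only [PySem.List.insertBy] <;> split_ifs <;> dsimp only <;>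
    split_ifs <;> simp only [decide_eq_true_eq, gt_iff_lt, not_and, not_lt] at * <;>
    first | rfl | omega

theorem total_zero_of_all_nil (patterns : List (String × List (List (String × Int))))
    (h : ∀ kv ∈ patterns, kv.2 = []) :
    patterns.foldl (fun acc p => acc + (p.2.length : Int)) 0 = 0 := by
  induction patterns with
  | nil => rfl
  | cons kv rest ih =>
    have hkv := h kv (by simp)
    simp only [List.foldl, hkv]
    exact ih (fun x hx => h x (by simp [hx]))

theorem get?_isSome_of_mem_fst (patterns : List (String × List (List (String × Int))))
    (k : String) (h : k ∈ patterns.map Prod.fst) :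
    ((PySem.Dict.mk patterns).get? k).isSome := by
  induction patterns with
  | nil => simp at h
  | cons kv rest ih =>
    rw [PySem.Dict.get?_mk_cons]
    by_cases hk : kv.1 == k
    · simp [hk]
    · simp only [hk, if_false, Bool.false_eq_true]
      apply ih
      simp only [List.map, List.mem_cons] at h
      rcases h with h | h
      · exact absurd (by simp [h]) hk
      · exact h

-- ===== VERDICT (by name: the statement is the Claim_ definition above) =====
theorem generate_pattern_assessment_py_spec : Claim_equal_generate_pattern_assessment_py := by
  intro patterns _ hpre
  unfold Spec_generate_pattern_assessment_py generate_pattern_assessment_py generate_pattern_assessment_py_alt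
  simp only
  by_cases htot : patterns.foldl (fun acc p => acc + (p.2.length : Int)) 0 = 0
  · simp [htot]
  · rcases hpre with hnil | ⟨h1, h2, h3⟩
    · exact absurd (total_zero_of_all_nil patterns hnil) htot
    · simp only [htot, if_false]
      obtain ⟨t, ht⟩ := Option.isSome_iff_exists.mp (get?_isSome_of_mem_fst patterns _ h1)
      obtain ⟨p, hp⟩ := Option.isSome_iff_exists.mp (get?_isSome_of_mem_fst patterns _ h2)
      obtain ⟨e, he⟩ := Option.isSome_iff_exists.mp (get?_isSome_of_mem_fst patterns _ h3)
      rw [ht, hp, he]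
      exact core_eq _ _ _
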